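-- pv_equiv track=rewrite | github.com/HeoYou/algorithm-python | 220326-test-01.py | solution
-- ===== SOURCE A (Python) =====
-- def solution(logs):
--
--     answer = 0
--
--     for l in logs:
--         if len(l) > 100:
--             answer += 1
--             continue
--
--         l = l.split(" ")
--         if len(l) != 12:
--             answer += 1
--         elif l[0] !=  "team_name":
--             answer += 1
--         elif l[3] !=  "application_name":
--             answer += 1
--         elif l[6] !=  "error_level":
--             answer += 1
--         elif l[9] !=  "message":
--             answer += 1
--         elif not l[2].isalpha():
--             answer += 1
--         elif not l[5].isalpha():
--             answer += 1
--         elif not l[8].isalpha():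
--             answer += 1
--         elif not l[11].isalpha():
--             answer += 1
--     return answer
-- ===== SOURCE B (Python) =====
-- def solution(logs):
--     # Staged sieve: whole-list filter passes over a shrinking survivor list,
--     # driven by data tables; invalid count = total - survivors.
--     survivors = [l for l in logs if len(l) <= 100]
--     survivors = [l.split(" ") for l in survivors]
--     survivors = [t for t in survivors if len(t) == 12]
--     for i, kw in ((0, "team_name"), (3, "application_name"),
--                   (6, "error_level"), (9, "message")):
--         survivors = [t for t in survivors if t[i] == kw]
--     for i in (2, 5, 8, 11):
--         survivors = [t for t in survivors if t[i].isalpha()]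
--     return len(logs) - len(survivors)
-- ===== Notes on version B (the rewrite author's own statement) =====
-- stated objective: alternative
-- what changed: Replaces A's single loop with a nine-branch elif chain incrementing an invalid counter by a data-driven sieve: ten whole-list filter passes (length, split, token count, then table-driven keyword and alpha passes) over a shrinking survivor list, returning len(logs) minus the survivors.
import Mathlib
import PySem

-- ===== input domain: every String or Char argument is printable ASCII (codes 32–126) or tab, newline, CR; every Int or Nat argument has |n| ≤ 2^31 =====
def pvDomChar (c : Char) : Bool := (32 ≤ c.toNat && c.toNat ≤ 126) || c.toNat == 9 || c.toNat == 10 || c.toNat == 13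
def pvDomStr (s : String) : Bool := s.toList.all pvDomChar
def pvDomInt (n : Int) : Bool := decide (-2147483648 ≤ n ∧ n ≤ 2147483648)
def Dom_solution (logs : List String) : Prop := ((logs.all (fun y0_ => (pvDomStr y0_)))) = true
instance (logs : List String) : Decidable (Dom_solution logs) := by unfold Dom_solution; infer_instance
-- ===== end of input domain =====

-- B replaces A's single loop with an elif chain by a data-driven sieve of whole-list
-- filter passes over a shrinking survivor list, returning total minus survivors (objective: alternative).

-- ===== PORT A =====
-- one iteration of A's loop body (indexing guarded by the length-12 check, so pyGetD is exact)
def pvStepA (answer : Int) (l : String) : Int :=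
  if PySem.Str.len l > 100 then answer + 1
  else
    let t := (PySem.Str.split? l " ").getD []
    if t.length ≠ 12 then answer + 1
    else if PySem.List.pyGetD t 0 "" ≠ "team_name" then answer + 1
    else if PySem.List.pyGetD t 3 "" ≠ "application_name" then answer + 1
    else if PySem.List.pyGetD t 6 "" ≠ "error_level" then answer + 1
    else if PySem.List.pyGetD t 9 "" ≠ "message" then answer + 1
    else if ¬ (PySem.Str.strIsalpha (PySem.List.pyGetD t 2 "") = true) then answer + 1
    else if ¬ (PySem.Str.strIsalpha (PySem.List.pyGetD t 5 "") = true) then answer + 1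
    else if ¬ (PySem.Str.strIsalpha (PySem.List.pyGetD t 8 "") = true) then answer + 1
    else if ¬ (PySem.Str.strIsalpha (PySem.List.pyGetD t 11 "") = true) then answer + 1
    else answer

def solution (logs : List String) : Int := logs.foldl pvStepA 0

-- ===== PORT B =====
-- indexing in the later passes is guarded by the earlier length-12 pass, so pyGetD is exact
def solution_alt (logs : List String) : Int :=
  let s1 := logs.filter (fun l => PySem.Str.len l ≤ 100)
  let s2 := s1.map (fun l => (PySem.Str.split? l " ").getD [])
  let s3 := s2.filter (fun t => t.length == 12)
  let s4 := [(0, "team_name"), (3, "application_name"), (6, "error_level"), (9, "message")].foldl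
    (fun acc (p : Nat × String) => acc.filter (fun t => PySem.List.pyGetD t p.1 "" == p.2)) s3
  let s5 := ([2, 5, 8, 11] : List Nat).foldl
    (fun acc i => acc.filter (fun t => PySem.Str.strIsalpha (PySem.List.pyGetD t i ""))) s4
  (logs.length : Int) - (s5.length : Int)

-- ===== PRECONDITION & SPEC =====
def Spec_solution (logs : List String) (out : Int) : Prop := out = solution_alt logs
instance (logs : List String) (out : Int) : Decidable (Spec_solution logs out) := by unfold Spec_solution; infer_instance

-- ===== CLAIM (what is proved, stated in full; the proofs are below) =====
def Claim_equal_solution : Prop := ∀ (logs : List String), Dom_solution logs → Spec_solution logs (solution logs)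

-- ===== LEMMAS AND PROOFS =====
-- the combined per-line validity test both programs implement
def pvValid (l : String) : Bool :=
  (PySem.Str.len l ≤ 100) &&
    (let t := (PySem.Str.split? l " ").getD []
     t.length == 12 && PySem.List.pyGetD t 0 "" == "team_name"
       && PySem.List.pyGetD t 3 "" == "application_name"
       && PySem.List.pyGetD t 6 "" == "error_level"
       && PySem.List.pyGetD t 9 "" == "message"
       && PySem.Str.strIsalpha (PySem.List.pyGetD t 2 "")
       && PySem.Str.strIsalpha (PySem.List.pyGetD t 5 "")
       && PySem.Str.strIsalpha (PySem.List.pyGetD t 8 "")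
       && PySem.Str.strIsalpha (PySem.List.pyGetD t 11 ""))

theorem pvStepA_eq (a : Int) (l : String) :
    pvStepA a l = a + (if pvValid l then 0 else 1) := by
  unfold pvStepA pvValid
  split_ifs <;> simp_all <;> omega

theorem pvFoldA (logs : List String) (a : Int) :
    logs.foldl pvStepA a = a + (logs.length : Int) - (logs.countP pvValid : Int) := by
  induction logs generalizing a with
  | nil => simp
  | cons x xs ih =>
    simp only [List.foldl_cons, List.length_cons, List.countP_cons, ih, pvStepA_eq]
    by_cases h : pvValid x = true <;> simp [h] <;> ring

set_option maxHeartbeats 1000000 in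
theorem pvAltCount (logs : List String) :
    solution_alt logs = (logs.length : Int) - (logs.countP pvValid : Int) := by
  unfold solution_alt
  simp only [List.foldl_cons, List.foldl_nil, List.filter_filter, List.filter_map,
    List.length_map, List.countP_eq_length_filter]
  congr 2
  apply congrArg
  apply List.filter_congr
  intro l _
  unfold pvValid
  simp only [Function.comp_apply, Nat.cast_ofNat, Nat.cast_zero]
  ac_rfl

-- ===== VERDICT (by name: the statement is the Claim_ definition above) =====
theorem solution_spec : Claim_equal_solution := by
  intro logs _
  unfold Spec_solution solution
  rw [pvFoldA, pvAltCount]; ring
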